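-- pv_equiv track=rewrite | github.com/benbendaisy/CommunicationCodes | python_module/examples/3208_Alternating_Groups_II.py | numberOfAlternatingGroups2
-- ===== SOURCE A (Python) =====
-- from typing import List
--
-- def numberOfAlternatingGroups2(colors: List[int], k: int) -> int:
--     if not colors or len(colors) < k:
--         return 0
--
--     n = len(colors)
--     count = 0
--
--     # Check every possible starting position
--     for i in range(n):
--         is_alternating = True
--
--         # Check if k-length subarray follows the alternating pattern
--         for j in range(k - 1):
--             curr_idx = (i + j) % n
--             next_idx = (i + j + 1) % n
--
--             if colors[curr_idx] == colors[next_idx]:  # If two consecutive tiles are same, not alternating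
--                 is_alternating = False
--                 break
--
--         if is_alternating:
--             count += 1
--
--     return count
-- ===== SOURCE B (Python) =====
-- from typing import List
--
-- def numberOfAlternatingGroups2(colors: List[int], k: int) -> int:
--     # Sliding window: track the length of the alternating run ending at each
--     # position of the circularly extended array; a window of k tiles starting
--     # at i is alternating iff the run ending at i+k-1 has length >= k.
--     n = len(colors)
--     if n == 0 or n < k:
--         return 0
--     if k <= 1:
--         return n  # every window trivially alternates
--     count = 0
--     run = 1
--     for i in range(1, n + k - 1):
--         if colors[i % n] != colors[(i - 1) % n]:
--             run += 1
--         else: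
--             run = 1
--         if run >= k:
--             count += 1
--     return count
-- ===== Notes on version B (the rewrite author's own statement) =====
-- stated objective: faster
-- what changed: Replaced the O(n*k) per-window rescan with a single O(n+k) sliding pass that maintains the length of the current alternating run over the circularly extended array and counts positions where the run reaches k.
import Mathlib
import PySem

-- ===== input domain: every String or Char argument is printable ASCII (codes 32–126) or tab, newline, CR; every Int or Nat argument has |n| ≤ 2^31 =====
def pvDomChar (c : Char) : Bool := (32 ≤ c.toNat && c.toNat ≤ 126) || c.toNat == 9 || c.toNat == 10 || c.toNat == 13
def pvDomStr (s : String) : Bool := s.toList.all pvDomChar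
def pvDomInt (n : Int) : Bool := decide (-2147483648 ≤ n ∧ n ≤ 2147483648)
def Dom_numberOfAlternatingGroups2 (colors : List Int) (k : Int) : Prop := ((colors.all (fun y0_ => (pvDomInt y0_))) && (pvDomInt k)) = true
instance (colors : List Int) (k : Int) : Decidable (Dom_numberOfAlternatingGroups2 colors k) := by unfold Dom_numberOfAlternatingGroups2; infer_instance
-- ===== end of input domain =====

-- B replaces A's O(n*k) per-window rescan by a single sliding pass tracking the
-- alternating-run length over the circular array (asymptotically faster).

-- ===== PORT A =====
-- colors[idx]: every index used by either port is (…) % n with 0 < n, hence in range;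
-- pyGetD is exact there.
def pvGet (colors : List Int) (idx : Int) : Int := PySem.List.pyGetD colors idx 0

-- inner 'for j in range(k-1)' with break
def pvInnerA (colors : List Int) (n i : Int) : List Int → Bool
  | [] => true
  | j :: js =>
      if pvGet colors (PySem.Int.mod (i + j) n) = pvGet colors (PySem.Int.mod (i + j + 1) n) then
        false
      else pvInnerA colors n i js

def numberOfAlternatingGroups2 (colors : List Int) (k : Int) : Int :=
  if colors = [] ∨ (colors.length : Int) < k then 0
  else
    let n : Int := (colors.length : Int)
    (PySem.List.pyRange 0 n 1).foldl
      (fun count i =>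
        if pvInnerA colors n i (PySem.List.pyRange 0 (k - 1) 1) then count + 1 else count) 0

-- ===== PORT B =====
def numberOfAlternatingGroups2_alt (colors : List Int) (k : Int) : Int :=
  let n : Int := (colors.length : Int)
  if n = 0 ∨ n < k then 0
  else if k ≤ 1 then n
  else
    ((PySem.List.pyRange 1 (n + k - 1) 1).foldl
      (fun (st : Int × Int) i =>
        let run : Int :=
          if pvGet colors (PySem.Int.mod i n) ≠ pvGet colors (PySem.Int.mod (i - 1) n) then st.2 + 1
          else 1
        (if k ≤ run then st.1 + 1 else st.1, run)) ((0 : Int), (1 : Int))).1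

-- ===== PRECONDITION & SPEC =====
def Spec_numberOfAlternatingGroups2 (colors : List Int) (k : Int) (out : Int) : Prop := out = numberOfAlternatingGroups2_alt colors k
instance (colors : List Int) (k : Int) (out : Int) : Decidable (Spec_numberOfAlternatingGroups2 colors k out) := by unfold Spec_numberOfAlternatingGroups2; infer_instance

-- ===== CLAIM (what is proved, stated in full; the proofs are below) =====
def Claim_equal_numberOfAlternatingGroups2 : Prop := ∀ (colors : List Int) (k : Int), Dom_numberOfAlternatingGroups2 colors k → Spec_numberOfAlternatingGroups2 colors k (numberOfAlternatingGroups2 colors k)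

-- ===== LEMMAS AND PROOFS =====

-- circular access, Nat index
def gIdx (colors : List Int) (t : Nat) : Int := colors.getD (t % colors.length) 0

-- A's inner check, Nat world: chk i m ↔ the m pairs (i,i+1),…,(i+m-1,i+m) all differ
def chk (colors : List Int) : Nat → Nat → Bool
  | _, 0 => true
  | t, m + 1 => if gIdx colors t = gIdx colors (t + 1) then false else chk colors (t + 1) m

-- B's run length: length of maximal alternating suffix ending at e
def runlen (colors : List Int) : Nat → Nat
  | 0 => 1
  | e + 1 => if gIdx colors (e + 1) ≠ gIdx colors e then runlen colors e + 1 else 1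

theorem pvGet_mod (colors : List Int) (t : Nat) :
    pvGet colors (PySem.Int.mod (t : Int) (colors.length : Int)) = gIdx colors t := by
  rw [pvGet, PySem.Int.mod_natCast, PySem.List.pyGetD_natCast, gIdx]

theorem one_le_runlen (colors : List Int) (e : Nat) : 1 ≤ runlen colors e := by
  cases e with
  | zero => simp [runlen]
  | succ e => rw [runlen]; split <;> omega

theorem runlen_le (colors : List Int) (e : Nat) : runlen colors e ≤ e + 1 := by
  induction e with
  | zero => simp [runlen]
  | succ e ih => rw [runlen]; split <;> omega

-- chk as a ∀-statement
theorem chk_iff (colors : List Int) (m t : Nat) :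
    chk colors t m = true ↔ ∀ j < m, gIdx colors (t + j) ≠ gIdx colors (t + j + 1) := by
  induction m generalizing t with
  | zero => simp [chk]
  | succ m ih =>
    rw [chk]
    split
    · rename_i h
      simp only [Bool.false_eq_true, false_iff]
      intro hall
      exact hall 0 (by omega) (by simpa using h)
    · rename_i h
      rw [ih]
      constructor
      · intro hall j hj
        cases j with
        | zero => simpa using h
        | succ j =>
          have := hall j (by omega)
          simpa [Nat.add_assoc, Nat.add_comm, Nat.add_left_comm] using this
      · intro hall j hj
        have := hall (j + 1) (by omega)
        simpa [Nat.add_assoc, Nat.add_comm, Nat.add_left_comm] using this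

-- runlen as a ∀-statement (backwards pairs)
theorem runlen_iff (colors : List Int) (e m : Nat) (hm : m ≤ e) :
    m + 1 ≤ runlen colors e ↔ ∀ j < m, gIdx colors (e - j) ≠ gIdx colors (e - j - 1) := by
  induction e generalizing m with
  | zero =>
    interval_cases m
    simp [one_le_runlen]
  | succ e ih =>
    cases m with
    | zero => simp [one_le_runlen]
    | succ m =>
      rw [runlen]
      split
      · rename_i hne
        have h1 : m + 1 + 1 ≤ runlen colors e + 1 ↔ m + 1 ≤ runlen colors e := by omega
        rw [h1, ih m (by omega)]
        constructor
        · intro hall j hj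
          cases j with
          | zero => simpa using hne
          | succ j =>
            have := hall j (by omega)
            have he1 : e + 1 - (j + 1) = e - j := by omega
            have he2 : e + 1 - (j + 1) - 1 = e - j - 1 := by omega
            rw [he2, he1]; exact this
        · intro hall j hj
          have := hall (j + 1) (by omega)
          have he1 : e + 1 - (j + 1) = e - j := by omega
          have he2 : e + 1 - (j + 1) - 1 = e - j - 1 := by omega
          rw [he2, he1] at this; exact this
      · rename_i heq
        simp only [ne_eq, not_not] at heq
        constructor
        · intro h; omega
        · intro hall
          exact absurd (hall 0 (by omega)) (by simpa using heq)

-- window-at-i alternates ↔ run at its last index reaches k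
theorem chk_eq_runlen (colors : List Int) (i K : Nat) (hK : 1 ≤ K) :
    chk colors i (K - 1) = true ↔ K ≤ runlen colors (i + (K - 1)) := by
  rw [chk_iff]
  have h1 : K = (K - 1) + 1 := by omega
  rw [show (K ≤ runlen colors (i + (K - 1))) = ((K - 1) + 1 ≤ runlen colors (i + (K - 1))) by
        rw [← h1],
      runlen_iff colors _ _ (by omega)]
  constructor
  · intro hall j hj
    have := hall (K - 1 - j - 1) (by omega)
    have e1 : i + (K - 1) - j = i + (K - 1 - j - 1) + 1 := by omega
    have e2 : i + (K - 1) - j - 1 = i + (K - 1 - j - 1) := by omega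
    rw [e2, e1]
    exact fun h => this h.symm
  · intro hall j hj
    have := hall (K - 1 - j - 1) (by omega)
    have e1 : i + (K - 1) - (K - 1 - j - 1) = i + j + 1 := by omega
    have e2 : i + (K - 1) - (K - 1 - j - 1) - 1 = i + j := by omega
    rw [e2, e1] at this
    exact fun h => this h.symm

-- ---- A-side loop lemmas ----
theorem innerA_eq_chk (colors : List Int) (i : Nat) :
    ∀ (m a : Nat), pvInnerA colors (colors.length : Int) (i : Int)
        (PySem.List.pyRange (a : Int) ((a : Int) + (m : Int)) 1) = chk colors (i + a) m := by
  intro m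
  induction m with
  | zero =>
    intro a
    rw [show ((a : Int) + ((0 : Nat) : Int)) = (a : Int) by simp,
        PySem.List.pyRange_one_eq_nil (le_refl _)]
    rfl
  | succ m ih =>
    intro a
    rw [PySem.List.pyRange_one_cons (by push_cast; omega), pvInnerA]
    have hca : (i : Int) + (a : Int) = ((i + a : Nat) : Int) := by push_cast; ring
    have hca1 : ((i + a : Nat) : Int) + 1 = ((i + a + 1 : Nat) : Int) := by push_cast; ring
    rw [hca, hca1, pvGet_mod colors (i + a), pvGet_mod colors (i + a + 1)]
    have hrange : ((a : Int) + 1) = ((a + 1 : Nat) : Int) := by push_cast; ring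
    have hrange2 : (a : Int) + ((m + 1 : Nat) : Int) = ((a + 1 : Nat) : Int) + ((m : Nat) : Int) := by
      push_cast; ring
    rw [hrange2, hrange, chk]
    split
    · rfl
    · rw [ih (a + 1), Nat.add_assoc]

theorem foldl_count_range (P : Int → Bool) :
    ∀ (m a : Nat) (c : Int),
      (PySem.List.pyRange (a : Int) ((a : Int) + (m : Int)) 1).foldl
        (fun count i => if P i then count + 1 else count) c
      = c + ((List.range' a m).countP (fun t : Nat => P (t : Int)) : Int) := by
  intro m
  induction m with
  | zero =>
    intro a c
    rw [show ((a : Int) + ((0 : Nat) : Int)) = (a : Int) by simp,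
        PySem.List.pyRange_one_eq_nil (le_refl _)]
    simp
  | succ m ih =>
    intro a c
    rw [PySem.List.pyRange_one_cons (by push_cast; omega), List.foldl_cons]
    have hrange2 : (a : Int) + ((m + 1 : Nat) : Int) = ((a + 1 : Nat) : Int) + ((m : Nat) : Int) := by
      push_cast; ring
    have hrange : ((a : Int) + 1) = ((a + 1 : Nat) : Int) := by push_cast; ring
    rw [hrange2, hrange, List.range'_succ, List.countP_cons]
    split
    · rename_i h
      rw [ih]
      simp
      ring
    · rename_i h
      rw [ih]
      simp

-- ---- B-side loop lemma ----
theorem foldl_B (colors : List Int) (k : Int) :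
    ∀ (m a : Nat) (c : Int), 1 ≤ a →
      ((PySem.List.pyRange (a : Int) ((a : Int) + (m : Int)) 1).foldl
        (fun (st : Int × Int) i =>
          let run : Int :=
            if pvGet colors (PySem.Int.mod i (colors.length : Int)) ≠
                pvGet colors (PySem.Int.mod (i - 1) (colors.length : Int)) then st.2 + 1
            else 1
          (if k ≤ run then st.1 + 1 else st.1, run))
        (c, (runlen colors (a - 1) : Int))).1
      = c + ((List.range' a m).countP (fun e => decide (k ≤ (runlen colors e : Int))) : Int) := by
  intro m
  induction m with
  | zero =>
    intro a c _
    rw [show ((a : Int) + ((0 : Nat) : Int)) = (a : Int) by simp,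
        PySem.List.pyRange_one_eq_nil (le_refl _)]
    simp
  | succ m ih =>
    intro a c ha
    rw [PySem.List.pyRange_one_cons (by push_cast; omega), List.foldl_cons]
    have hsub : (a : Int) - 1 = ((a - 1 : Nat) : Int) := by push_cast [ha]; ring
    rw [hsub, pvGet_mod colors a, pvGet_mod colors (a - 1)]
    have hrun : (if gIdx colors a ≠ gIdx colors (a - 1) then (runlen colors (a - 1) : Int) + 1
                 else 1) = (runlen colors a : Int) := by
      have hae : a = (a - 1) + 1 := by omega
      rw [hae, runlen, Nat.add_sub_cancel]
      split
      · push_cast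
        rfl
      · rfl
    simp only [hrun]
    have hrange2 : (a : Int) + ((m + 1 : Nat) : Int) = ((a + 1 : Nat) : Int) + ((m : Nat) : Int) := by
      push_cast; ring
    have hrange : ((a : Int) + 1) = ((a + 1 : Nat) : Int) := by push_cast; ring
    have hnext : (runlen colors a : Int) = (runlen colors ((a + 1) - 1) : Int) := by
      simp
    rw [hrange2, hrange, List.range'_succ, List.countP_cons]
    split
    · rename_i h
      rw [hnext, ih (a + 1) (c + 1) (by omega)]
      simp [h]
      ring
    · rename_i h
      rw [hnext, ih (a + 1) c (by omega)]
      simp [h]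

theorem count_shift (f : Nat → Bool) (s n : Nat) :
    (List.range' 0 n).countP (fun i => f (i + s)) = (List.range' s n).countP f := by
  rw [← List.range_eq_range', List.range'_eq_map_range, List.countP_map]
  apply List.countP_congr
  intro a _
  simp [Nat.add_comm]

theorem range'_split (s m n : Nat) :
    List.range' s (m + n) = List.range' s m ++ List.range' (s + m) n := by
  have h := List.range'_append (s := s) (m := m) (n := n) (step := 1)
  simp only [one_mul] at h
  exact h.symm

theorem main_eq (colors : List Int) (k : Int) (hne : colors ≠ [])
    (hk : k ≤ (colors.length : Int)) (hk2 : 2 ≤ k) :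
    (PySem.List.pyRange 0 (colors.length : Int) 1).foldl
      (fun count i =>
        if pvInnerA colors (colors.length : Int) i (PySem.List.pyRange 0 (k - 1) 1) then count + 1
        else count) 0
    = ((PySem.List.pyRange 1 ((colors.length : Int) + k - 1) 1).foldl
        (fun (st : Int × Int) i =>
          let run : Int :=
            if pvGet colors (PySem.Int.mod i (colors.length : Int)) ≠
                pvGet colors (PySem.Int.mod (i - 1) (colors.length : Int)) then st.2 + 1
            else 1
          (if k ≤ run then st.1 + 1 else st.1, run)) ((0 : Int), (1 : Int))).1 := by
  set L := colors.length with hL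
  have hL1 : 1 ≤ L := List.length_pos_of_ne_nil hne
  set K := k.toNat with hKdef
  have hKk : (K : Int) = k := Int.toNat_of_nonneg (by omega)
  have hK2 : 2 ≤ K := by omega
  have hKL : K ≤ L := by omega
  -- A side: foldl = countP over range L
  have hA := foldl_count_range
    (fun i => pvInnerA colors (L : Int) i (PySem.List.pyRange 0 (k - 1) 1)) L 0 0
  rw [show (((0 : Nat) : Int)) = (0 : Int) by simp] at hA
  rw [show ((0 : Int) + ((L : Nat) : Int)) = ((L : Nat) : Int) by ring] at hA
  rw [hA]
  -- B side: foldl = countP over range' 1 (L + K - 2)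
  have hB := foldl_B colors k (L + K - 2) 1 0 (le_refl 1)
  rw [show (((1 : Nat) : Int) + ((L + K - 2 : Nat) : Int)) = (L : Int) + k - 1 by omega] at hB
  rw [show ((1 : Nat) : Int) = (1 : Int) by simp] at hB
  rw [show ((runlen colors (1 - 1) : Nat) : Int) = (1 : Int) by norm_num [runlen]] at hB
  rw [hB]
  -- rewrite A's predicate to the run-length predicate
  have hpred : ∀ i : Nat,
      (pvInnerA colors (L : Int) (i : Int) (PySem.List.pyRange 0 (k - 1) 1) = true)
        ↔ (decide (k ≤ (runlen colors (i + (K - 1)) : Int)) = true) := by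
    intro i
    have h := innerA_eq_chk colors i (K - 1) 0
    rw [show (((0 : Nat) : Int)) = (0 : Int) by simp] at h
    rw [show ((0 : Int) + ((K - 1 : Nat) : Int)) = k - 1 by omega] at h
    rw [Nat.add_zero] at h
    rw [h, chk_eq_runlen colors i K (by omega)]
    simp only [decide_eq_true_eq]
    omega
  rw [List.countP_congr (fun i _ => hpred i)]
  -- split B's range and drop the prefix, where the run cannot yet reach k
  have hzero : (List.range' 1 (K - 2)).countP
      (fun e => decide (k ≤ (runlen colors e : Int))) = 0 := by
    rw [List.countP_eq_zero]
    intro e he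
    have h1 := List.mem_range'_1.mp he
    have h2 := runlen_le colors e
    simp only [decide_eq_true_eq]
    omega
  rw [show L + K - 2 = (K - 2) + L by omega, range'_split 1 (K - 2) L,
      show 1 + (K - 2) = K - 1 by omega, List.countP_append, hzero,
      ← count_shift (fun e => decide (k ≤ (runlen colors e : Int))) (K - 1) L]
  simp

-- ===== VERDICT (by name: the statement is the Claim_ definition above) =====
theorem numberOfAlternatingGroups2_spec : Claim_equal_numberOfAlternatingGroups2 := by
  intro colors k _
  unfold Spec_numberOfAlternatingGroups2
  simp only [numberOfAlternatingGroups2, numberOfAlternatingGroups2_alt]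
  by_cases h0 : colors = [] ∨ (colors.length : Int) < k
  · rw [if_pos h0, if_pos (h0.imp (fun h => by simp [h]) id)]
  · push_neg at h0
    obtain ⟨hne, hk⟩ := h0
    have hL1 : 1 ≤ colors.length := List.length_pos_of_ne_nil hne
    rw [if_neg (by push_neg; exact ⟨hne, hk⟩), if_neg (by push_neg; constructor <;> omega)]
    by_cases hk1 : k ≤ 1
    · rw [if_pos hk1]
      have hnil : PySem.List.pyRange 0 (k - 1) 1 = [] :=
        PySem.List.pyRange_one_eq_nil (by omega)
      simp only [hnil]
      have hA := foldl_count_range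
        (fun i => pvInnerA colors (colors.length : Int) i ([] : List Int)) colors.length 0 0
      rw [show (((0 : Nat) : Int)) = (0 : Int) by simp] at hA
      rw [show ((0 : Int) + ((colors.length : Nat) : Int)) = ((colors.length : Nat) : Int) by ring]
        at hA
      rw [hA]
      simp [pvInnerA]
    · rw [if_neg hk1]
      exact main_eq colors k hne hk (by omega)
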